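-- pv_equiv track=rewrite | github.com/gwmitch/Scrabble_CP365 | ScrabbleBotter.py | evaluate_word
-- ===== SOURCE A (Python) =====
-- def evaluate_word(word, index, spaces_before, letters,hand):
--     original_hand_size = len(hand)
--     # explained later in the code
--     letters_search = letters + " "
--
--     offset = spaces_before - index
--     if offset < 0:
--         return -1
--     if offset != 0 and letters[offset-1] != ' ':
--         return -1
--     else:
--         words_match = True
--         if offset + len(word) > len(letters):
--             return -1
--         for i in range(0, len(word)):
--             offset_i = i + offset
--             if letters[offset_i] != ' ':
--                 if letters[offset_i] != word[i]:
--                     words_match = False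
--                     break
--             else:
--
--                 if not word[i] in hand:
--                     return -1
--                 else:
--                     letter_index = hand.index(word[i])
--                     hand = hand[:letter_index] + hand[letter_index+1:]
--         if words_match:
--             # check if any letter from hand has been used
--             if len(hand) >= original_hand_size:
--                 return -1
--             # previously we appended a space to the letters on board, so that we don't run into
--             # a non-existing index issue
--             if letters_search[offset+len(word)] == ' ':
--                 return offset
--     return -1
-- ===== SOURCE B (Python) =====
-- def evaluate_word(word, index, spaces_before, letters, hand):
--     offset = spaces_before - index
--     if offset < 0 or offset + len(word) > len(letters):
--         return -1
--     if offset != 0 and letters[offset - 1] != ' ':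
--         return -1
--     needed = []
--     for i, w in enumerate(word):
--         b = letters[offset + i]
--         if b == ' ':
--             needed.append(w)
--         elif b != w:
--             return -1
--     if not needed:
--         return -1
--     if not all(needed.count(c) <= hand.count(c) for c in needed):
--         return -1
--     if offset + len(word) == len(letters) or letters[offset + len(word)] == ' ':
--         return offset
--     return -1
-- ===== Notes on version B (the rewrite author's own statement) =====
-- stated objective: simpler
-- what changed: B makes one pass that only collects the tiles needed at blank squares (returning -1 on any board mismatch), then checks feasibility once by multiset count containment against the hand, replacing A's in-loop hand mutation via index/slicing and its hand-length comparison; 'some tile used' becomes 'needed is non-empty'.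
import Mathlib
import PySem

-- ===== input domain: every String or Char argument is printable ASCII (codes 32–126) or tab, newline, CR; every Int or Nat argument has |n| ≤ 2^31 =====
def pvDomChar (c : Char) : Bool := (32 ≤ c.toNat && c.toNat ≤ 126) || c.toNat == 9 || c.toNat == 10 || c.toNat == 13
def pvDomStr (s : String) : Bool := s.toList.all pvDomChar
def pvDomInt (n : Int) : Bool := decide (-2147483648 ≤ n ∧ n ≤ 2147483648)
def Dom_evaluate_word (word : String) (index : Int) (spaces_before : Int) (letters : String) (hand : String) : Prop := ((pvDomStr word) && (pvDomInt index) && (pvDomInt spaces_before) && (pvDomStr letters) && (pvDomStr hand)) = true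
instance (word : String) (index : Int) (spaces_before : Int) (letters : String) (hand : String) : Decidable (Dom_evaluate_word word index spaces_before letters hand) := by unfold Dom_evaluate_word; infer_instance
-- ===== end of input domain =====

-- B collects the needed tiles in one pass and checks multiset containment once,
-- instead of A's in-loop hand mutation and hand-length comparison (objective: simpler).


-- ===== PORT A =====
-- A's for-loop: i over range(len(word)), mutating `hand`.  Both the in-loop
-- `return -1` and the `break` with words_match = False lead to the same final
-- `return -1`, so the loop result is `none` for either exit and `some hand` on
-- normal completion.  `hand.index`/slicing is ported literally.
def pvLoopA (letters word : List Char) (offset : Nat) : Nat → List Char → Option (List Char)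
  | i, hand =>
    if _h : i < word.length then
      let c := letters.getD (i + offset) ' '    -- letters[offset_i]; in range under Pre_
      let w := word.getD i ' '                  -- word[i]; in range (i < len word)
      if c ≠ ' ' then
        if c ≠ w then none                      -- words_match = False; break
        else pvLoopA letters word offset (i+1) hand
      else
        if w ∈ hand then
          match PySem.List.index? hand w with
          | some k => pvLoopA letters word offset (i+1)
              (PySem.List.slice hand none (some (k : Int)) ++ PySem.List.slice hand (some ((k : Int)+1)) none)
          | none => none                        -- unreachable: w ∈ hand
        else none                               -- return -1
    else some hand
  termination_by i _ => word.length - i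

def evaluate_word (word : String) (index : Int) (spaces_before : Int) (letters : String) (hand : String) : Int :=
  let wordL := word.toList
  let lettersL := letters.toList
  let handL := hand.toList
  let original_hand_size := handL.length
  let letters_search := lettersL ++ [' ']
  let offset := spaces_before - index
  if offset < 0 then -1
  else if offset ≠ 0 ∧ lettersL.getD (offset.toNat - 1) ' ' ≠ ' ' then -1   -- letters[offset-1]; in range under Pre_
  else if (offset + wordL.length : Int) > (lettersL.length : Int) then -1
  else
    match pvLoopA lettersL wordL offset.toNat 0 handL with
    | none => -1
    | some hand' =>
      if hand'.length ≥ original_hand_size then -1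
      else if letters_search.getD (offset.toNat + wordL.length) ' ' = ' ' then offset
      else -1

-- ===== PORT B =====
-- one pass over word: mismatch on a filled square → none; collect letters needed at blanks
def pvScanB (letters : List Char) : Nat → List Char → Option (List Char)
  | _, [] => some []
  | pos, w :: ws =>
    let b := letters.getD pos ' '               -- letters[pos]; in range under Pre_
    if b = ' ' then (pvScanB letters (pos+1) ws).map (w :: ·)
    else if b ≠ w then none
    else pvScanB letters (pos+1) ws

def evaluate_word_alt (word : String) (index : Int) (spaces_before : Int) (letters : String) (hand : String) : Int :=
  let wordL := word.toList
  let lettersL := letters.toList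
  let handL := hand.toList
  let offset := spaces_before - index
  if offset < 0 ∨ (offset + wordL.length : Int) > (lettersL.length : Int) then -1
  else if offset ≠ 0 ∧ lettersL.getD (offset.toNat - 1) ' ' ≠ ' ' then -1
  else
    match pvScanB lettersL offset.toNat wordL with
    | none => -1
    | some needed =>
      if needed = [] then -1
      else if ¬ (needed.all fun c => PySem.List.count needed c ≤ PySem.List.count handL c) then -1
      else if offset.toNat + wordL.length = lettersL.length ∨ lettersL.getD (offset.toNat + wordL.length) ' ' = ' ' then offset
      else -1

-- ===== PRECONDITION & SPEC =====
-- Pre_ excludes exactly the inputs where A raises IndexError: offset = spaces_before - index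
-- larger than len(letters), where letters[offset-1] is out of range.
def Pre_evaluate_word (word : String) (index : Int) (spaces_before : Int) (letters : String) (hand : String) : Prop :=
  spaces_before - index ≤ (letters.toList.length : Int)
instance (word : String) (index : Int) (spaces_before : Int) (letters : String) (hand : String) : Decidable (Pre_evaluate_word word index spaces_before letters hand) := by unfold Pre_evaluate_word; infer_instance
def pvWitness_evaluate_word : String × Int × Int × String × String := ("ab", 0, 0, "  ", "ba")

def Spec_evaluate_word (word : String) (index : Int) (spaces_before : Int) (letters : String) (hand : String) (out : Int) : Prop := out = evaluate_word_alt word index spaces_before letters hand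
instance (word : String) (index : Int) (spaces_before : Int) (letters : String) (hand : String) (out : Int) : Decidable (Spec_evaluate_word word index spaces_before letters hand out) := by unfold Spec_evaluate_word; infer_instance

-- ===== CLAIM (what is proved, stated in full; the proofs are below) =====
def Claim_equal_evaluate_word : Prop := ∀ (word : String) (index : Int) (spaces_before : Int) (letters : String) (hand : String), Dom_evaluate_word word index spaces_before letters hand → Pre_evaluate_word word index spaces_before letters hand → Spec_evaluate_word word index spaces_before letters hand (evaluate_word word index spaces_before letters hand)
-- ===== LEMMAS AND PROOFS =====

-- A's `hand[:k] + hand[k+1:]` with k = hand.index(w) is `hand.erase w`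
theorem pv_slice_index_erase (hand : List Char) (w : Char) (k : Nat)
    (hk : PySem.List.index? hand w = some k) :
    PySem.List.slice hand none (some (k : Int)) ++ PySem.List.slice hand (some ((k : Int)+1)) none
      = hand.erase w := by
  rw [PySem.List.index?_eq_idxOf?] at hk
  have h1 : ((k : Int) + 1) = (((k+1 : Nat) : Int)) := by push_cast; ring
  rw [PySem.List.slice_to_natCast, h1, PySem.List.slice_from_natCast,
      List.erase_eq_eraseIdx, hk]
  simp [List.eraseIdx_eq_take_drop_succ]

theorem pv_allcount_iff (needed hand : List Char) :
    ((needed.all fun c => PySem.List.count needed c ≤ PySem.List.count hand c) = true)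
      ↔ (∀ c, List.count c needed ≤ List.count c hand) := by
  simp only [List.all_eq_true, PySem.List.count_eq, decide_eq_true_eq]
  constructor
  · intro h c
    by_cases hc : c ∈ needed
    · exact h c hc
    · simp [List.count_eq_zero_of_not_mem hc]
  · intro h c _
    exact h c

theorem pv_count_cons_erase_iff (w : Char) (needed hand : List Char) (hw : w ∈ hand) :
    (∀ c, List.count c (w :: needed) ≤ List.count c hand)
      ↔ (∀ c, List.count c needed ≤ List.count c (hand.erase w)) := by
  have hpos : 0 < List.count w hand := List.count_pos_iff.mpr hw
  constructor
  · intro h c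
    have hc := h c
    rw [List.count_cons] at hc
    rw [List.count_erase]
    by_cases hcw : c = w
    · subst hcw; simp at hc ⊢; omega
    · simp [hcw, Ne.symm hcw] at hc ⊢; omega
  · intro h c
    have hc := h c
    rw [List.count_erase] at hc
    rw [List.count_cons]
    by_cases hcw : c = w
    · subst hcw; simp at hc ⊢; omega
    · simp [hcw, Ne.symm hcw] at hc ⊢; omega

theorem pv_trailing (L : List Char) (j : Nat) (hj : j ≤ L.length) :
    ((L ++ [' ']).getD j ' ' = ' ') ↔ (j = L.length ∨ L.getD j ' ' = ' ') := by
  rcases lt_or_eq_of_le hj with h | h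
  · have hne : j ≠ L.length := Nat.ne_of_lt h
    simp [List.getD, List.getElem?_append_left h, hne]
  · subst h
    simp [List.getD]

-- Core correspondence between A's mutating loop and B's scan + count containment.
theorem pv_key (letters word : List Char) (offset : Nat) :
    ∀ n i hand, word.length - i ≤ n →
      ((pvScanB letters (i + offset) (word.drop i) = none →
          pvLoopA letters word offset i hand = none) ∧
       (∀ needed, pvScanB letters (i + offset) (word.drop i) = some needed →
          ((∀ c, List.count c needed ≤ List.count c hand) →
              ∃ h', pvLoopA letters word offset i hand = some h' ∧
                    h'.length + needed.length = hand.length) ∧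
          (¬ (∀ c, List.count c needed ≤ List.count c hand) →
              pvLoopA letters word offset i hand = none))) := by
  intro n
  induction n with
  | zero =>
    intro i hand hn
    have hi : ¬ i < word.length := by omega
    rw [pvLoopA]
    simp only [dif_neg hi]
    have hd : word.drop i = [] := List.drop_eq_nil_of_le (by omega)
    rw [hd]
    refine ⟨by intro h; simp [pvScanB] at h, ?_⟩
    intro needed hs
    simp only [pvScanB, Option.some.injEq] at hs
    subst hs
    exact ⟨fun _ => ⟨hand, rfl, by simp⟩, fun h => absurd (by simp) h⟩
  | succ n ih =>
    intro i hand hn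
    by_cases hi : i < word.length
    case neg =>
      rw [pvLoopA]
      simp only [dif_neg hi]
      have hd : word.drop i = [] := List.drop_eq_nil_of_le (by omega)
      rw [hd]
      refine ⟨by intro h; simp [pvScanB] at h, ?_⟩
      intro needed hs
      simp only [pvScanB, Option.some.injEq] at hs
      subst hs
      exact ⟨fun _ => ⟨hand, rfl, by simp⟩, fun h => absurd (by simp) h⟩
    case pos =>
      have hdrop : word.drop i = word[i] :: word.drop (i+1) := List.drop_eq_getElem_cons hi
      have hgd : word.getD i ' ' = word[i] := List.getD_eq_getElem word ' ' hi
      have hpos : i + offset + 1 = (i+1) + offset := by omega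
      rw [pvLoopA]
      simp only [dif_pos hi, hgd, hdrop, pvScanB]
      set b := letters.getD (i + offset) ' ' with hb
      set w := word[i] with hwdef
      by_cases hbs : b = ' '
      case pos =>
        simp only [if_pos hbs, hbs, if_neg (by simp : ¬ (' ' ≠ ' '))]
        rw [hpos]
        by_cases hw : w ∈ hand
        case pos =>
          have hsome : (PySem.List.index? hand w).isSome :=
            (PySem.List.index?_isSome_iff hand w).mpr hw
          obtain ⟨k, hk⟩ := Option.isSome_iff_exists.mp hsome
          simp only [if_pos hw, hk]
          rw [pv_slice_index_erase hand w k hk]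
          have IH := ih (i+1) (hand.erase w) (by omega)
          constructor
          · intro hsc
            cases hsc' : pvScanB letters ((i+1) + offset) (word.drop (i+1)) with
            | none => exact IH.1 hsc'
            | some needed => rw [hsc'] at hsc; simp at hsc
          · intro needed hsc
            cases hsc' : pvScanB letters ((i+1) + offset) (word.drop (i+1)) with
            | none => rw [hsc'] at hsc; simp at hsc
            | some needed' =>
              rw [hsc'] at hsc
              simp at hsc
              subst hsc
              have hiff := pv_count_cons_erase_iff w needed' hand hw
              have hlen : (hand.erase w).length = hand.length - 1 :=
                List.length_erase_of_mem hw
              have hh1 : 1 ≤ hand.length := List.length_pos_of_mem hw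
              constructor
              · intro hcnt
                obtain ⟨h', hl', he'⟩ := (IH.2 needed' hsc').1 (hiff.mp hcnt)
                exact ⟨h', hl', by simp only [List.length_cons]; omega⟩
              · intro hcnt
                exact (IH.2 needed' hsc').2 (fun h => hcnt (hiff.mpr h))
        case neg =>
          simp only [if_neg hw]
          constructor
          · intro _; trivial
          · intro needed hsc
            cases hsc' : pvScanB letters ((i+1) + offset) (word.drop (i+1)) with
            | none => rw [hsc'] at hsc; simp at hsc
            | some needed' =>
              rw [hsc'] at hsc
              simp at hsc
              subst hsc
              refine ⟨fun hcnt => ?_, fun _ => trivial⟩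
              exfalso
              have := hcnt w
              rw [List.count_cons_self, List.count_eq_zero_of_not_mem hw] at this
              omega
      case neg =>
        have hb' : b ≠ ' ' := hbs
        by_cases hbw : b = w
        case pos =>
          have hne : ¬ (b ≠ w) := fun h => h hbw
          simp only [if_neg hbs, if_pos hb', if_neg hne, hpos]
          exact ih (i+1) hand (by omega)
        case neg =>
          simp only [if_neg hbs, if_pos hb', if_pos hbw]
          refine ⟨?_, ?_⟩
          · intro _; trivial
          · intro needed hsc; simp at hsc

-- ===== VERDICT (by name: the statement is the Claim_ definition above) =====
theorem evaluate_word_spec : Claim_equal_evaluate_word := by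
  intro word index spaces_before letters hand _ hpre
  unfold Pre_evaluate_word at hpre
  unfold Spec_evaluate_word evaluate_word evaluate_word_alt
  set W := word.toList with hW
  set L := letters.toList with hL
  set H := hand.toList with hH
  set off := spaces_before - index with hoff
  by_cases h0 : off < 0
  · simp [h0]
  by_cases hbound : (off + (W.length : Int)) > (L.length : Int)
  · simp only [if_neg h0, if_pos (Or.inr hbound)]
    split_ifs <;> rfl
  have hBg : ¬ (off < 0 ∨ (off + (W.length : Int)) > (L.length : Int)) := by
    rintro (h | h) <;> [exact h0 h; exact hbound h]
  simp only [if_neg h0, if_neg hBg]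
  by_cases hprev : off ≠ 0 ∧ L.getD (off.toNat - 1) ' ' ≠ ' '
  · rw [if_pos hprev, if_pos hprev]
  rw [if_neg hprev, if_neg hprev, if_neg hbound]
  have hjle : off.toNat + W.length ≤ L.length := by omega
  have hkey := pv_key L W off.toNat W.length 0 H (by omega)
  rw [Nat.zero_add, List.drop_zero] at hkey
  cases hscan : pvScanB L off.toNat W with
  | none => rw [hkey.1 hscan]
  | some needed =>
    have hk2 := hkey.2 needed hscan
    by_cases hcnt : ∀ c, List.count c needed ≤ List.count c H
    · obtain ⟨h', hl', hlen⟩ := hk2.1 hcnt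
      rw [hl']
      simp only []
      by_cases hnil : needed = []
      · subst hnil
        rw [if_pos (show h'.length ≥ H.length by simp at hlen; omega), if_pos rfl]
      · have hlt : ¬ (h'.length ≥ H.length) := by
          have : 0 < needed.length := List.length_pos_iff.mpr hnil
          omega
        rw [if_neg hlt, if_neg hnil]
        have hall := (pv_allcount_iff needed H).mpr hcnt
        rw [if_neg (show ¬ (¬ (needed.all fun c => PySem.List.count needed c ≤ PySem.List.count H c) = true) by simpa using hall)]
        have htr := pv_trailing L (off.toNat + W.length) hjle
        by_cases ht : off.toNat + W.length = L.length ∨ L.getD (off.toNat + W.length) ' ' = ' '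
        · rw [if_pos (htr.mpr ht), if_pos ht]
        · rw [if_neg (fun h => ht (htr.mp h)), if_neg ht]
    · rw [hk2.2 hcnt]
      simp only []
      have hnil : needed ≠ [] := by
        intro h; subst h; exact hcnt (by simp)
      have hall : ¬ ((needed.all fun c => PySem.List.count needed c ≤ PySem.List.count H c) = true) :=
        fun h => hcnt ((pv_allcount_iff needed H).mp h)
      rw [if_neg hnil, if_pos (show ¬ (needed.all fun c => PySem.List.count needed c ≤ PySem.List.count H c) = true from hall)]
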